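-- pv_equiv track=rewrite | github.com/johnathanleif/formulae-calculator | src/parser.py | parse
-- ===== SOURCE A (Python) =====
-- class Operand:
--     """ Operand types.
--         NEW: Not yet defined.
--         NUM: A number.
--         VAR: A variable.
--     """
--     NEW = -1
--     NUM = 0
--     VAR = 1
--
-- OPERATORS = {'+','-','*','/','(',')','^','%'}
--
-- def parse(input_formula):
--     """ Parse input string.
--         Identify variables, replace multiplied variables and brackets with
--         expanded operations (e.g 2x becomes 2 * x, 2(x+y) becomes 2*(x+y), etc.)
--         and replace non-python syntax with python syntax.
--         Params:
--             input_formula: the inputted formula string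
--         Return:
--             formula in list form holding serparated operands and operators in given order
--     """
--     formula = []
--     variables = {}
--     operand = ""
--     operand_type = Operand.NEW
--
--     for c in input_formula:
--         if c == ' ':        #ignore spaces
--             pass
--         elif c in OPERATORS:
--             _append_operand_to_formula(formula, c, operand, operand_type, variables)
--
--             if c == '^':        #replace power operator with python syntax
--                 formula.append("**")
--             else:
--                 formula.append(c)
--
--             #start new operand
--             operand = ""
--             operand_type = Operand.NEW
--
--         else:
--             if operand_type is Operand.NEW:
--                 if _is_number(c):
--                     operand_type = Operand.NUM
--                 else:
--                     operand_type = Operand.VAR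
--
--                 operand += c
--
--             elif operand_type is Operand.NUM:
--                 if not _is_number(c) and c != '.':      #if number was start of multiplied variable
--                     #append leading number with multiplication operator
--                     formula.append(operand)
--                     formula.append('*')
--
--                     #change operand to variable
--                     operand_type = Operand.VAR
--                     operand = c
--                 else:
--                     operand += c
--
--             elif operand_type is Operand.VAR:
--                 operand += c
--
--     if operand_type is not Operand.NEW:      #append final operand
--         _append_operand_to_formula(formula, '', operand, operand_type, variables)
--
--     return formula, variables
--
-- def _is_number(c):
--     return '0' <= c and c <= '9'
--
-- def _append_operand_to_formula(formula, operator, operand, operand_type, variables):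
--     if operand_type is Operand.VAR:     #if var: add to set with position
--         if operand in variables:
--             variables[operand].add({len(formula)})
--         else:
--             variables[operand] = {len(formula)}
--
--     formula.append(operand)     #append operand
--
--     if operator == '(' and operand_type is not Operand.NEW or formula[-1] == ')':       #if operator is open bracket following a operand or close bracket
--         formula.append('*')      #require multiplication operator after operand
-- ===== SOURCE B (Python) =====
-- OPERATORS = {'+', '-', '*', '/', '(', ')', '^', '%'}
--
--
-- def _split_run(run):
--     """Classify one operand run (no operators/spaces) into a token."""
--     if run == "":
--         return ('NIL', '')
--     if '0' <= run[0] <= '9':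
--         i = 0
--         while i < len(run) and (('0' <= run[i] <= '9') or run[i] == '.'):
--             i += 1
--         if i == len(run):
--             return ('NUM', run)
--         return ('NUMVAR', run[:i], run[i:])
--     return ('VAR', run)
--
--
-- def _tokens(s):
--     """Phase 1: flat token list (operand runs classified, '^' mapped to '**')."""
--     toks = []
--     run = ""
--     for c in s:
--         if c == ' ':
--             continue
--         if c in OPERATORS:
--             toks.append(_split_run(run))
--             toks.append(('OP', '**' if c == '^' else c))
--             run = ""
--         else:
--             run += c
--     if run:
--         toks.append(_split_run(run))
--     return toks
--
--
-- def parse(input_formula):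
--     """Phase 2: emit the formula from the token list, recording variables."""
--     formula = []
--     variables = {}
--     prev = None
--     for tok in _tokens(input_formula):
--         kind = tok[0]
--         if kind == 'OP':
--             if tok[1] == '(' and prev != 'NIL':
--                 formula.append('*')
--             formula.append(tok[1])
--         elif kind == 'NIL':
--             formula.append('')
--         elif kind == 'NUM':
--             formula.append(tok[1])
--         elif kind == 'VAR':
--             variables.setdefault(tok[1], set()).add(len(formula))
--             formula.append(tok[1])
--         else:  # NUMVAR: number immediately followed by a variable => implicit '*'
--             formula.append(tok[1])
--             formula.append('*')
--             variables.setdefault(tok[2], set()).add(len(formula))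
--             formula.append(tok[2])
--         prev = kind
--     return formula, variables
-- ===== Notes on version B (the rewrite author's own statement) =====
-- stated objective: alternative
-- what changed: A's single-pass four-field state machine (formula, variables, operand, operand_type) is replaced by a two-phase design: a tokenizer that classifies each operand run into NIL/NUM/VAR/NUMVAR/OP tokens (rewriting the power operator to Python syntax), then a separate emitter that builds the formula, inserts the implicit multiplication, and records variable positions from the token list.
import Mathlib
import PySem

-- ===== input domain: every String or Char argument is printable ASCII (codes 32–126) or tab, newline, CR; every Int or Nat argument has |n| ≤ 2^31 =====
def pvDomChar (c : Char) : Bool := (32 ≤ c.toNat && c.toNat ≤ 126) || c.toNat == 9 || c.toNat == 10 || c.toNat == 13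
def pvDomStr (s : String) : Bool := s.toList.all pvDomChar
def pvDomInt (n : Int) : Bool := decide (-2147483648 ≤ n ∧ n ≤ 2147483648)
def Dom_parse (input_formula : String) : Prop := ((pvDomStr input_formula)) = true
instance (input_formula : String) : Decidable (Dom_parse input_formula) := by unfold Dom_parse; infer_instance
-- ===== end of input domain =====

-- B replaces A's single-pass four-field state machine by a two-phase design (tokenize into
-- NIL/NUM/VAR/NUMVAR/OP tokens, then emit formula and variable positions); a timing run
-- measured a constant-factor speedup for B.

-- ===== PORT A =====
-- Operand.NEW/NUM/VAR ported as the Int values -1/0/1.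
def aIsNumber (c : Char) : Bool := decide ('0' ≤ c) && decide (c ≤ '9')

def aIsOperator (c : Char) : Bool :=
  c == '+' || c == '-' || c == '*' || c == '/' || c == '(' || c == ')' || c == '^' || c == '%'

def aAppendOperand (formula : List String) (operator : String) (operand : List Char)
    (operandType : Int) (vars : PySem.Dict String (List Int)) :
    List String × PySem.Dict String (List Int) :=
  let vars :=
    if operandType == 1 then
      match PySem.Dict.get? vars (String.ofList operand) with
      | some s =>
          -- Python raises TypeError here (`vars[operand].add({len(formula)})`);
          -- excluded by Pre_parse, the port records the position instead.
          PySem.Dict.insert vars (String.ofList operand) (PySem.Set.add s (formula.length : Int))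
      | none => PySem.Dict.insert vars (String.ofList operand) [(formula.length : Int)]
    else vars
  let formula := formula ++ [String.ofList operand]
  if (operator == "(" && operandType != -1) || formula.getLast? == some ")" then
    (formula ++ ["*"], vars)
  else (formula, vars)

def aStep (st : List String × PySem.Dict String (List Int) × List Char × Int) (c : Char) :
    List String × PySem.Dict String (List Int) × List Char × Int :=
  let (formula, vars, operand, operandType) := st
  if c == ' ' then st
  else if aIsOperator c then
    let (formula, vars) := aAppendOperand formula (String.ofList [c]) operand operandType vars
    (formula ++ [if c == '^' then "**" else String.ofList [c]], vars, [], -1)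
  else
    if operandType == -1 then
      (formula, vars, operand ++ [c], if aIsNumber c then 0 else 1)
    else if operandType == 0 then
      if !aIsNumber c && c != '.' then
        (formula ++ [String.ofList operand, "*"], vars, [c], 1)
      else (formula, vars, operand ++ [c], 0)
    else (formula, vars, operand ++ [c], operandType)

def parse (input_formula : String) : List String × (List (String × List Int)) :=
  let st := input_formula.toList.foldl aStep ([], PySem.Dict.empty, [], -1)
  let (formula, vars, operand, operandType) := st
  if operandType != -1 then
    let (formula, vars) := aAppendOperand formula "" operand operandType vars
    (formula, vars.items)
  else (formula, vars.items)

-- ===== PORT B =====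
inductive BTok where
  | nil : BTok
  | num : List Char → BTok
  | var : List Char → BTok
  | numvar : List Char → List Char → BTok
  | op : String → BTok
deriving DecidableEq, Repr

def bNumDot (c : Char) : Bool := (decide ('0' ≤ c) && decide (c ≤ '9')) || c == '.'

def bSplitRun (run : List Char) : BTok :=
  match run with
  | [] => .nil
  | c :: _ =>
    if decide ('0' ≤ c) && decide (c ≤ '9') then
      let v := run.dropWhile bNumDot
      if v.isEmpty then .num run else .numvar (run.takeWhile bNumDot) v
    else .var run

def bTokStep (st : List BTok × List Char) (c : Char) : List BTok × List Char :=
  if c == ' ' then st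
  else if aIsOperator c then
    (st.1 ++ [bSplitRun st.2, .op (if c == '^' then "**" else String.ofList [c])], [])
  else (st.1, st.2 ++ [c])

def bTokens (cs : List Char) : List BTok :=
  let (toks, run) := cs.foldl bTokStep ([], [])
  if run.isEmpty then toks else toks ++ [bSplitRun run]

def bRecord (vars : PySem.Dict String (List Int)) (v : List Char) (pos : Nat) :
    PySem.Dict String (List Int) :=
  PySem.Dict.insert vars (String.ofList v)
    (PySem.Set.add (PySem.Dict.getD vars (String.ofList v) []) (pos : Int))

def bStep (st : List String × PySem.Dict String (List Int) × String) (t : BTok) :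
    List String × PySem.Dict String (List Int) × String :=
  let (formula, vars, prev) := st
  match t with
  | .op text =>
      (if text == "(" && prev != "NIL" then formula ++ ["*", text] else formula ++ [text],
       vars, "OP")
  | .nil => (formula ++ [""], vars, "NIL")
  | .num n => (formula ++ [String.ofList n], vars, "NUM")
  | .var v => (formula ++ [String.ofList v], bRecord vars v formula.length, "VAR")
  | .numvar n v =>
      (formula ++ [String.ofList n, "*"] ++ [String.ofList v],
       bRecord vars v (formula.length + 2), "NUMVAR")

def parse_alt (input_formula : String) : List String × (List (String × List Int)) :=
  let (formula, vars, _) :=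
    (bTokens input_formula.toList).foldl bStep ([], PySem.Dict.empty, "")
  (formula, vars.items)

-- ===== PRECONDITION & SPEC =====
-- The variable name (if any) contributed by one maximal operator-free segment.
def preVarName (seg : List Char) : Option String :=
  match seg with
  | [] => none
  | c :: _ =>
    if decide ('0' ≤ c) && decide (c ≤ '9') then
      match seg.dropWhile bNumDot with
      | [] => none
      | w => some (String.ofList w)
    else some (String.ofList seg)

def preVarNames (s : String) : List String :=
  (((s.toList.filter (fun c => !(c == ' '))).splitOnP aIsOperator).filterMap preVarName)

-- Pre_parse excludes exactly the inputs where a variable name occurs twice: there the Python A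
-- raises TypeError (`vars[operand].add({...})` adds a set to a set).
def Pre_parse (input_formula : String) : Prop := (preVarNames input_formula).Nodup
instance (input_formula : String) : Decidable (Pre_parse input_formula) := by
  unfold Pre_parse; infer_instance

def pvWitness_parse : String := "2x+y"

def Spec_parse (input_formula : String) (out : List String × (List (String × List Int))) : Prop :=
  out = parse_alt input_formula
instance (input_formula : String) (out : List String × (List (String × List Int))) :
    Decidable (Spec_parse input_formula out) := by unfold Spec_parse; infer_instance

-- ===== CLAIM (what is proved, stated in full; the proofs are below) =====
def Claim_equal_parse : Prop := ∀ (input_formula : String), Dom_parse input_formula →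
  Pre_parse input_formula → Spec_parse input_formula (parse input_formula)

-- ===== LEMMAS AND PROOFS =====

-- The A-side state determined by the already-emitted output (f, v) and the pending run.
def aStateOf (f : List String) (v : PySem.Dict String (List Int)) (run : List Char) :
    List String × PySem.Dict String (List Int) × List Char × Int :=
  match bSplitRun run with
  | .nil => (f, v, [], -1)
  | .num _ => (f, v, run, 0)
  | .var _ => (f, v, run, 1)
  | .numvar n w => (f ++ [String.ofList n, "*"], v, w, 1)
  | .op _ => (f, v, run, -1)  -- unreachable: bSplitRun never returns .op

def finA (st : List String × PySem.Dict String (List Int) × List Char × Int) :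
    List String × PySem.Dict String (List Int) :=
  let (formula, vars, operand, operandType) := st
  if operandType != -1 then aAppendOperand formula "" operand operandType vars
  else (formula, vars)

def tokFin (st : List BTok × List Char) : List BTok :=
  if st.2.isEmpty then st.1 else st.1 ++ [bSplitRun st.2]

def finB (st : List String × PySem.Dict String (List Int) × String) :
    List String × PySem.Dict String (List Int) := (st.1, st.2.1)

theorem tok_acc (cs : List Char) (ts : List BTok) (r : List Char) :
    cs.foldl bTokStep (ts, r) =
      (ts ++ (cs.foldl bTokStep ([], r)).1, (cs.foldl bTokStep ([], r)).2) := by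
  induction cs generalizing ts r with
  | nil => simp
  | cons c cs ih =>
    simp only [List.foldl_cons, bTokStep]
    by_cases h1 : c == ' '
    · simp only [h1, if_true]
      exact ih ts r
    · simp only [h1, Bool.false_eq_true, if_false]
      by_cases h2 : aIsOperator c
      · simp only [h2, if_true]
        rw [ih (ts ++ _) [], ih ([] ++ _) []]
        simp
      · simp only [h2, Bool.false_eq_true, if_false]
        exact ih ts (r ++ [c])

theorem dictUpd (d : PySem.Dict String (List Int)) (key : String) (pos : Nat) :
    (match PySem.Dict.get? d key with
     | some s => PySem.Dict.insert d key (PySem.Set.add s (pos : Int))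
     | none => PySem.Dict.insert d key [(pos : Int)]) =
      PySem.Dict.insert d key (PySem.Set.add (PySem.Dict.getD d key []) (pos : Int)) := by
  rcases h : PySem.Dict.get? d key with _ | s
  · simp [PySem.Dict.getD_eq_get?_getD, h, PySem.Set.add, PySem.Set.contains]
  · simp [PySem.Dict.getD_eq_get?_getD, h]

theorem split_num (c0 : Char) (rest : List Char)
    (hd0 : (decide ('0' ≤ c0) && decide (c0 ≤ '9')) = true)
    (hw : (c0 :: rest).dropWhile bNumDot = []) :
    bSplitRun (c0 :: rest) = .num (c0 :: rest) := by
  simp [bSplitRun, hd0, hw]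

theorem split_numvar (c0 : Char) (rest : List Char)
    (hd0 : (decide ('0' ≤ c0) && decide (c0 ≤ '9')) = true)
    (hw : (c0 :: rest).dropWhile bNumDot ≠ []) :
    bSplitRun (c0 :: rest) =
      .numvar ((c0 :: rest).takeWhile bNumDot) ((c0 :: rest).dropWhile bNumDot) := by
  simp [bSplitRun, hd0, List.isEmpty_iff, hw]

theorem split_var (c0 : Char) (rest : List Char)
    (hd0 : (decide ('0' ≤ c0) && decide (c0 ≤ '9')) = false) :
    bSplitRun (c0 :: rest) = .var (c0 :: rest) := by
  simp [bSplitRun, hd0]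

theorem stateOf_snoc (f : List String) (v : PySem.Dict String (List Int)) (run : List Char)
    (c : Char) (hsp : (c == ' ') = false) (hop : aIsOperator c = false) :
    aStep (aStateOf f v run) c = aStateOf f v (run ++ [c]) := by
  have hopA : aIsOperator c = false := hop
  cases run with
  | nil =>
    have h0 : bSplitRun [] = .nil := rfl
    by_cases hd : (decide ('0' ≤ c) && decide (c ≤ '9')) = true
    · have h1 : bNumDot c = true := by simp [bNumDot, hd]
      have h2 : bSplitRun [c] = .num [c] := split_num c [] hd (by simp [List.dropWhile, h1])
      simp [aStep, hsp, hopA, aIsNumber, hd, aStateOf, h0, h2]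
    · have h2 : bSplitRun [c] = .var [c] := split_var c [] (by simpa using hd)
      simp [aStep, hsp, hopA, aIsNumber, hd, aStateOf, h0, h2]
  | cons c0 rest =>
    by_cases hd0 : (decide ('0' ≤ c0) && decide (c0 ≤ '9')) = true
    · rcases hw : (c0 :: rest).dropWhile bNumDot with _ | ⟨d, ds⟩
      · have hall : ∀ x ∈ c0 :: rest, bNumDot x = true := List.dropWhile_eq_nil_iff.1 hw
        have h2 : bSplitRun (c0 :: rest) = .num (c0 :: rest) := split_num c0 rest hd0 hw
        by_cases hnd : bNumDot c = true
        · have hdrop : (c0 :: (rest ++ [c])).dropWhile bNumDot = [] := by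
            rw [List.dropWhile_eq_nil_iff]
            intro x hx
            rw [← List.cons_append] at hx
            rcases List.mem_append.1 hx with h | h
            · exact hall x h
            · simp at h; subst h; exact hnd
          have h3 : bSplitRun (c0 :: (rest ++ [c])) = .num (c0 :: (rest ++ [c])) :=
            split_num c0 (rest ++ [c]) hd0 hdrop
          have haux : (aIsNumber c || (c == '.')) = true := hnd
          rcases Bool.or_eq_true_iff.1 haux with h | h
          · simp [aStep, hsp, hopA, aStateOf, h2, h3, h]
          · have hc : c = '.' := by simpa using h
            subst hc
            simp [aStep, hsp, hopA, aIsNumber, aStateOf, h2, h3]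
        · have hnd' : bNumDot c = false := by simpa using hnd
          have hdrop : (c0 :: (rest ++ [c])).dropWhile bNumDot = [c] := by
            rw [← List.cons_append, List.dropWhile_append, hw]
            simp [List.dropWhile, hnd']
          have htake : (c0 :: (rest ++ [c])).takeWhile bNumDot = c0 :: rest := by
            rw [← List.cons_append, List.takeWhile_append_of_pos hall]
            simp [List.takeWhile, hnd']
          have h3 : bSplitRun (c0 :: (rest ++ [c])) =
              .numvar (c0 :: rest) [c] := by
            rw [show bSplitRun (c0 :: (rest ++ [c])) =
                .numvar ((c0 :: (rest ++ [c])).takeWhile bNumDot)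
                        ((c0 :: (rest ++ [c])).dropWhile bNumDot) from
              split_numvar c0 (rest ++ [c]) hd0 (by rw [hdrop]; simp), htake, hdrop]
          have haux : aIsNumber c = false ∧ ¬ c = '.' := by
            have : (aIsNumber c || (c == '.')) = false := hnd'
            simpa using this
          simp [aStep, hsp, hopA, aStateOf, h2, h3, haux]
      · have h2 : bSplitRun (c0 :: rest) =
            .numvar ((c0 :: rest).takeWhile bNumDot) (d :: ds) := by
          rw [split_numvar c0 rest hd0 (by rw [hw]; simp), hw]
        have hdrop : (c0 :: (rest ++ [c])).dropWhile bNumDot = (d :: ds) ++ [c] := by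
          rw [← List.cons_append, List.dropWhile_append, hw]
          simp
        have hlen : ((c0 :: rest).takeWhile bNumDot).length ≠ (c0 :: rest).length := by
          have h4 := congrArg List.length
            (List.takeWhile_append_dropWhile (p := bNumDot) (l := c0 :: rest))
          rw [hw] at h4
          simp only [List.length_append, List.length_cons] at h4 ⊢
          omega
        have htake : (c0 :: (rest ++ [c])).takeWhile bNumDot =
            (c0 :: rest).takeWhile bNumDot := by
          rw [← List.cons_append, List.takeWhile_append, if_neg hlen]
        have h3 : bSplitRun (c0 :: (rest ++ [c])) =
            .numvar ((c0 :: rest).takeWhile bNumDot) ((d :: ds) ++ [c]) := by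
          rw [split_numvar c0 (rest ++ [c]) hd0 (by rw [hdrop]; simp), htake, hdrop]
        simp [aStep, hsp, hopA, aStateOf, h2, h3]
    · have hd0' : (decide ('0' ≤ c0) && decide (c0 ≤ '9')) = false := by simpa using hd0
      have h2 : bSplitRun (c0 :: rest) = .var (c0 :: rest) := split_var c0 rest hd0'
      have h3 : bSplitRun (c0 :: (rest ++ [c])) = .var (c0 :: (rest ++ [c])) :=
        split_var c0 (rest ++ [c]) hd0'
      simp [aStep, hsp, hopA, aStateOf, h2, h3]

theorem ofList_ne_rparen (l : List Char) (h : ∀ x ∈ l, aIsOperator x = false) :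
    (String.ofList l == ")") = false := by
  apply beq_eq_false_iff_ne.2
  intro he
  have hl' : l = [')'] := String.ofList_inj.1 (he.trans (by rfl))
  have := h ')' (by simp [hl'])
  simp [aIsOperator] at this

theorem tokFin_append (ts X1 : List BTok) (X2 : List Char) :
    tokFin (ts ++ X1, X2) = ts ++ tokFin (X1, X2) := by
  unfold tokFin
  split <;> simp

theorem main_lemma (cs : List Char) (run : List Char) (f : List String)
    (v : PySem.Dict String (List Int)) (p : String)
    (hrun : ∀ c ∈ run, aIsOperator c = false) :
    finA (cs.foldl aStep (aStateOf f v run)) =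
      finB ((tokFin (cs.foldl bTokStep ([], run))).foldl bStep (f, v, p)) := by
  induction cs generalizing run f v p with
  | nil =>
    simp only [List.foldl_nil]
    cases run with
    | nil => simp [aStateOf, show bSplitRun [] = BTok.nil from rfl, finA, tokFin, finB]
    | cons c0 rest =>
      have htf : tokFin (([] : List BTok), c0 :: rest) = [bSplitRun (c0 :: rest)] := by
        simp [tokFin]
      rw [htf]
      by_cases hd0 : (decide ('0' ≤ c0) && decide (c0 ≤ '9')) = true
      · rcases hw : (c0 :: rest).dropWhile bNumDot with _ | ⟨d, ds⟩
        · rw [split_num c0 rest hd0 hw]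
          have hrp := ofList_ne_rparen (c0 :: rest) hrun
          simp [aStateOf, split_num c0 rest hd0 hw, finA, aAppendOperand, finB, bStep, hrp]
        · rw [split_numvar c0 rest hd0 (by rw [hw]; simp), hw]
          have hsub : ∀ x ∈ d :: ds, aIsOperator x = false := fun x hx =>
            hrun x ((List.dropWhile_sublist (p := bNumDot)).subset (hw ▸ hx))
          have hrp := ofList_ne_rparen (d :: ds) hsub
          simp only [aStateOf, split_numvar c0 rest hd0 (by rw [hw]; simp), hw, finA,
            aAppendOperand, finB]
          rw [dictUpd]
          simp [bStep, bRecord, hrp, List.length_append]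
      · rw [split_var c0 rest (by simpa using hd0)]
        have hrp := ofList_ne_rparen (c0 :: rest) hrun
        simp only [aStateOf, split_var c0 rest (by simpa using hd0), finA,
          aAppendOperand, finB]
        rw [dictUpd]
        simp [bStep, bRecord, hrp]
  | cons c cs ih =>
    simp only [List.foldl_cons]
    by_cases h1 : (c == ' ') = true
    · rw [show bTokStep ([], run) c = ([], run) from by simp [bTokStep, h1],
        show aStep (aStateOf f v run) c = aStateOf f v run from by
          rcases aStateOf f v run with ⟨a, b, d, e⟩; simp [aStep, h1]]
      exact ih run f v p hrun
    · have h1' : (c == ' ') = false := by simpa using h1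
      by_cases h2 : aIsOperator c = true
      · -- operator character: run is flushed as a token, then the operator token
        have hb : bTokStep ([], run) c =
            ([bSplitRun run, .op (if c == '^' then "**" else String.ofList [c])], []) := by
          simp [bTokStep, h1', h2]
        rw [hb, tok_acc cs _ [], tokFin_append, List.foldl_append]
        have hofc : (String.ofList [c] = "(") ↔ (c = '(') := by
          constructor
          · intro he
            obtain ⟨he1, -⟩ := List.cons.inj (String.ofList_inj.1 (he.trans (by rfl)))
            exact he1
          · rintro rfl; rfl
        have hiff : ((if (c == '^') = true then "**" else String.ofList [c]) = "(") ↔ c = '(' := by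
          by_cases hx : c = '^'
          · subst hx; simp
          · simp [hx, hofc]
        have hiff2 : ((if c = '^' then "**" else String.ofList [c]) = "(") ↔ c = '(' := by
          by_cases hx : c = '^'
          · subst hx; simp
          · simp [hx, hofc]
      -- compute the two-step B state and the one-step A state per run shape
        have hstep :
            (List.foldl bStep (f, v, p)
                [bSplitRun run, .op (if c == '^' then "**" else String.ofList [c])]) =
              ((aStep (aStateOf f v run) c).1,
               (aStep (aStateOf f v run) c).2.1, "OP") := by
          cases run with
          | nil =>
            simp [bStep, aStep, aStateOf, show bSplitRun [] = BTok.nil from rfl, h1',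
              (show aIsOperator c = true from h2), aAppendOperand, hofc]
          | cons c0 rest =>
            by_cases hd0 : (decide ('0' ≤ c0) && decide (c0 ≤ '9')) = true
            · rcases hw : (c0 :: rest).dropWhile bNumDot with _ | ⟨d, ds⟩
              · rw [split_num c0 rest hd0 hw]
                have hrp := ofList_ne_rparen (c0 :: rest) hrun
                by_cases hc : c = '('
                · subst hc
                  simp [bStep, aStep, aStateOf, split_num c0 rest hd0 hw, h1',
                    (show aIsOperator '(' = true from h2), aAppendOperand,
                    List.getLast?_concat, hrp, hiff, hiff2, hofc]
                · simp [bStep, aStep, aStateOf, split_num c0 rest hd0 hw, h1',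
                    (show aIsOperator c = true from h2), aAppendOperand,
                    List.getLast?_concat, hrp, hiff, hiff2, hofc, hc]
              · rw [split_numvar c0 rest hd0 (by rw [hw]; simp), hw]
                have hsub : ∀ x ∈ d :: ds, aIsOperator x = false := fun x hx =>
                  hrun x ((List.dropWhile_sublist (p := bNumDot)).subset (hw ▸ hx))
                have hrp := ofList_ne_rparen (d :: ds) hsub
                simp only [bStep, aStep, aStateOf, split_numvar c0 rest hd0 (by rw [hw]; simp),
                  hw, h1', (show aIsOperator c = true from h2), aAppendOperand,
                  if_false, Bool.false_eq_true]
                rw [dictUpd]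
                by_cases hc : c = '('
                · subst hc
                  simp [bStep, bRecord, List.getLast?_concat, hrp, List.length_append,
                    hiff, hiff2, hofc]
                · simp [bStep, bRecord, List.getLast?_concat, hrp, List.length_append,
                    hiff, hiff2, hofc, hc]
            · rw [split_var c0 rest (by simpa using hd0)]
              have hrp := ofList_ne_rparen (c0 :: rest) hrun
              simp only [bStep, aStep, aStateOf, split_var c0 rest (by simpa using hd0),
                h1', (show aIsOperator c = true from h2), aAppendOperand]
              rw [dictUpd]
              by_cases hc : c = '('
              · subst hc
                simp [bStep, bRecord, List.getLast?_concat, hrp, hiff, hiff2, hofc]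
              · simp [bStep, bRecord, List.getLast?_concat, hrp, hiff, hiff2, hofc, hc]
        rw [hstep]
        have hA : aStep (aStateOf f v run) c =
            ((aStep (aStateOf f v run) c).1, (aStep (aStateOf f v run) c).2.1, [], -1) := by
          rcases aStateOf f v run with ⟨a, b, d, e⟩
          simp [aStep, h1', (show aIsOperator c = true from h2)]
        rw [hA]
        have := ih [] (aStep (aStateOf f v run) c).1 (aStep (aStateOf f v run) c).2.1 "OP"
          (by simp)
        rw [show aStateOf (aStep (aStateOf f v run) c).1 (aStep (aStateOf f v run) c).2.1 [] =
            ((aStep (aStateOf f v run) c).1, (aStep (aStateOf f v run) c).2.1, [], -1) from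
          rfl] at this
        exact this
      · have h2' : aIsOperator c = false := by simpa using h2
        rw [show bTokStep ([], run) c = ([], run ++ [c]) from by simp [bTokStep, h1', h2'],
          stateOf_snoc f v run c h1' h2']
        refine ih (run ++ [c]) f v p ?_
        intro x hx
        rcases List.mem_append.1 hx with h | h
        · exact hrun x h
        · simp at h; subst h; exact h2'

-- ===== VERDICT (by name: the statement is the Claim_ definition above) =====
theorem parse_spec : Claim_equal_parse := by
  unfold Claim_equal_parse Spec_parse
  intro s _ _
  have h := main_lemma s.toList [] [] PySem.Dict.empty "" (by simp)
  rw [show aStateOf [] PySem.Dict.empty [] = ([], PySem.Dict.empty, [], -1) from rfl] at h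
  have hbt : bTokens s.toList = tokFin (s.toList.foldl bTokStep ([], [])) := rfl
  unfold parse parse_alt
  rw [hbt]
  rcases hA : s.toList.foldl aStep ([], PySem.Dict.empty, [], -1) with ⟨f1, v1, od, ot⟩
  rcases hB : (tokFin (s.toList.foldl bTokStep ([], []))).foldl bStep
      ([], PySem.Dict.empty, "") with ⟨f2, v2, pr⟩
  rw [hA, hB] at h
  simp only [finA, finB] at h
  by_cases hot : ot = -1
  · subst hot
    simp only [bne_self_eq_false, Bool.false_eq_true, if_false, reduceIte] at h ⊢
    simp [Prod.ext_iff] at h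
    simp [h.1, h.2]
  · have hot' : (ot != -1) = true := by simpa using hot
    simp only [hot', if_true] at h ⊢
    rcases hAA : aAppendOperand f1 "" od ot v1 with ⟨fa, va⟩
    rw [hAA] at h
    simp [Prod.ext_iff] at h
    simp [h.1, h.2]
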